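-- pv_equiv track=rewrite | github.com/andxeg/qBraid_GPU4Quantum_Challenge_2025 | benchmarks/utils/parsing.py | get_max_token_count
-- ===== SOURCE A (Python) =====
-- def get_max_token_count(n):
--     token_map = {
--         5: 820,
--         10: 2050,
--         15: 4100,
--         20: 7175,
--         25: 10660,
--         30: 14350
--     }
--     # token_map = {
--     #     5: 1386,
--     #     10: 3465,
--     #     15: 6930,
--     #     20: 12127,
--     #     25: 18018,
--     #     30: 24255
--     # }
--
--     # Step 1: Sort the keys
--     sorted_keys = sorted(token_map.keys())
--
--     # Step 2: Find smallest key >= n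
--     for k in sorted_keys:
--         if n <= k:
--             return token_map[k]
--
--     # If n is greater than all keys, use the largest
--     return token_map[sorted_keys[-1]]
-- ===== SOURCE B (Python) =====
-- def get_max_token_count(n):
--     token_map = {
--         5: 820,
--         10: 2050,
--         15: 4100,
--         20: 7175,
--         25: 10660,
--         30: 14350
--     }
--     # Closed form: round n up to the next multiple of 5, clamped to [5, 30].
--     key = min(30, max(5, -(n // -5) * 5))
--     return token_map[key]
-- ===== Notes on version B (the rewrite author's own statement) =====
-- stated objective: simpler
-- what changed: Replaced the sort-then-linear-scan over the dict keys by a closed-form bucket computation: key = min(30, max(5, ceil(n/5)*5)) followed by a single dict lookup.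
import Mathlib
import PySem

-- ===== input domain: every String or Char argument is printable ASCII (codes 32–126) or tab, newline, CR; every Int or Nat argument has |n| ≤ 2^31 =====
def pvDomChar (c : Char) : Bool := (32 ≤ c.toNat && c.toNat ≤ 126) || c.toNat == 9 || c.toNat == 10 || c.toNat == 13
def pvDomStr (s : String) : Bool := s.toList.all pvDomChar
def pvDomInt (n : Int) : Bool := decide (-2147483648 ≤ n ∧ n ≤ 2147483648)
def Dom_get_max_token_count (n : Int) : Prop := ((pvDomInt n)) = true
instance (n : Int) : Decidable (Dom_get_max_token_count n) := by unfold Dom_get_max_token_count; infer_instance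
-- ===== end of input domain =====

-- B replaces A's sort + linear scan of the dict keys by a closed-form clamped-ceiling key computation (simpler).
-- ===== PORT A =====
-- the token_map literal of A (and of B)
def pvTokenMap : PySem.Dict Int Int :=
  PySem.Dict.ofList [(5, 820), (10, 2050), (15, 4100), (20, 7175), (25, 10660), (30, 14350)]

-- the 'for k in sorted_keys: if n <= k: return token_map[k]' loop (token_map[k]: key k comes from the dict, so .getD 0 is exact)
def pvScanA (n : Int) : List Int → Option Int
  | [] => none
  | k :: rest => if n ≤ k then some (PySem.Dict.getD pvTokenMap k 0) else pvScanA n rest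

def get_max_token_count (n : Int) : Int :=
  let sorted_keys := PySem.List.sorted pvTokenMap.keys id
  match pvScanA n sorted_keys with
  | some v => v
  | none => PySem.Dict.getD pvTokenMap ((PySem.List.pyGet? sorted_keys (-1)).getD 0) 0

-- ===== PORT B =====
def get_max_token_count_alt (n : Int) : Int :=
  let key := min 30 (max 5 (-(PySem.Int.floordiv n (-5)) * 5))
  PySem.Dict.getD pvTokenMap key 0

-- ===== PRECONDITION & SPEC =====
def Spec_get_max_token_count (n : Int) (out : Int) : Prop := out = get_max_token_count_alt n
instance (n : Int) (out : Int) : Decidable (Spec_get_max_token_count n out) := by unfold Spec_get_max_token_count; infer_instance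

-- ===== CLAIM (what is proved, stated in full; the proofs are below) =====
def Claim_equal_get_max_token_count : Prop := ∀ (n : Int), Dom_get_max_token_count n → Spec_get_max_token_count n (get_max_token_count n)

-- ===== LEMMAS AND PROOFS =====

-- ===== VERDICT (by name: the statement is the Claim_ definition above) =====
theorem get_max_token_count_spec : Claim_equal_get_max_token_count := by
  intro n _
  unfold Spec_get_max_token_count get_max_token_count get_max_token_count_alt
  have hdm := PySem.Int.floordiv_mul_add_mod n (-5)
  have hmb := PySem.Int.mod_neg_bounds n (b := -5) (by norm_num)
  set q := PySem.Int.floordiv n (-5) with hq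
  have hsk : PySem.List.sorted pvTokenMap.keys id = [5, 10, 15, 20, 25, 30] := by decide
  rw [hsk]
  simp only [pvScanA]
  split_ifs with h1 h2 h3 h4 h5' h6 <;>
    simp only [PySem.List.pyGet?, PySem.List.pyIdx?] <;> norm_num <;>
    (congr 1; omega)
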